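-- pv_equiv track=rewrite | github.com/dc487/advent-of-code-2021 | day_25_sea_cucumber/day_25_sea_cucumber.py | move_cucumbers
-- ===== SOURCE A (Python) =====
-- def move_cucumbers(current_state):
--     cucumbers_moved = 0
--
--     east_state = [x[:] for x in current_state]
--     for y, line in enumerate(current_state):
--         for x, character in enumerate(line):
--             if character == ">" and line[(x + 1) % len(line)] == ".":
--                 if (x + 1 < len(line)):
--                     east_state[y] = east_state[y][:x] + ".>" + east_state[y][x+2:]
--                 else:
--                     east_state[y] = ">" + east_state[y][1:len(line) - 1] + "."
--                 cucumbers_moved += 1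
--
--     north_state = [x[:] for x in east_state]
--     for y, line in enumerate(east_state):
--         for x, character in enumerate(line):
--             if character == "v" and east_state[(y + 1) % len(east_state)][x] == ".":
--                 north_state[y] = north_state[y][:x] + "." + north_state[y][x+1:]
--                 north_state[(y + 1) % len(east_state)] = north_state[(y + 1) % len(east_state)][:x] + "v" + north_state[(y + 1) % len(east_state)][x+1:]
--                 cucumbers_moved += 1
--
--     return (north_state, cucumbers_moved)
-- ===== SOURCE B (Python) =====
-- def move_cucumbers(current_state):
--     # Cellular-automaton formulation: each output cell is computed from its input
--     # neighbourhood (gather), instead of locating movers and writing them (scatter).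
--     moved = 0
--
--     east = []
--     for line in current_state:
--         W = len(line)
--         out = []
--         for x, c in enumerate(line):
--             if c == '.' and line[x - 1] == '>':
--                 out.append('>')
--             elif c == '>' and line[(x + 1) % W] == '.':
--                 out.append('.')
--                 moved += 1
--             else:
--                 out.append(c)
--         east.append(''.join(out))
--
--     H = len(east)
--     result = []
--     for y, line in enumerate(east):
--         above = east[y - 1]
--         below = east[(y + 1) % H]
--         out = []
--         for x, c in enumerate(line):
--             if c == '.' and x < len(above) and above[x] == 'v':
--                 out.append('v')
--             elif c == 'v' and below[x] == '.':
--                 out.append('.')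
--                 moved += 1
--             else:
--                 out.append(c)
--         result.append(''.join(out))
--
--     return (result, moved)
-- ===== Notes on version B (the rewrite author's own statement) =====
-- stated objective: alternative
-- what changed: B recasts the step as a cellular automaton: every output cell is computed locally from its input neighbourhood (gather, building each new row left to right with no mutation), whereas A locates each mover and scatters writes into a copied grid, rebuilding whole rows by string slicing with a special wrap-around branch.
import Mathlib
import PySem

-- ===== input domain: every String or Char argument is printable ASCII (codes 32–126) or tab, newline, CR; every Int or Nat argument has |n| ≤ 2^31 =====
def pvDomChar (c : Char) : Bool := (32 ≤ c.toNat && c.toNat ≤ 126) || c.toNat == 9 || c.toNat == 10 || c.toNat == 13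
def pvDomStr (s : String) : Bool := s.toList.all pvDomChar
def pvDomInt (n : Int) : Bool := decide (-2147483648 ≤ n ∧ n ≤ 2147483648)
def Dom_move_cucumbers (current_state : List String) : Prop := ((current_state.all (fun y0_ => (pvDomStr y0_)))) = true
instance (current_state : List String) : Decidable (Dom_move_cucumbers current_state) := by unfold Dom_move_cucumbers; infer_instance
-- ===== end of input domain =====

-- B recasts the step as a cellular automaton: each output cell is computed from its input
-- neighbourhood (gather, rows rebuilt left to right, nothing mutated), where A locates each
-- mover and scatters writes into a copied grid by string slicing with a wrap special case.

-- ===== PORT A =====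
-- Strings are handled on their code-point lists (String.toList / String.ofList), with
-- PySem.List.slice / pyGetD / pySetD for Python's slicing and indexing; the pyGetD default '?'
-- is only returned where Python would raise IndexError (excluded by Pre_ below).
-- inner-loop body of A's first (east) loop: one step for `x, character = xc` of row `y` (`line` is
-- the row of current_state being scanned; state = (east_state, cucumbers_moved))
def pvEastBodyA (line : String) (y : Int) (st : List String × Int) (xc : Int × Char) : List String × Int :=
  if xc.2 == '>' && PySem.List.pyGetD line.toList (PySem.Int.mod (xc.1 + 1) (PySem.Str.len line)) '?' == '.' then
    if xc.1 + 1 < PySem.Str.len line then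
      -- east_state[y] = east_state[y][:x] + ".>" + east_state[y][x+2:]
      let row := (PySem.List.pyGetD st.1 y "").toList
      (PySem.List.pySetD st.1 y (String.ofList
        (PySem.List.slice row none (some xc.1) ++ ['.', '>'] ++ PySem.List.slice row (some (xc.1 + 2)) none)),
       st.2 + 1)
    else
      -- east_state[y] = ">" + east_state[y][1:len(line) - 1] + "."
      let row := (PySem.List.pyGetD st.1 y "").toList
      (PySem.List.pySetD st.1 y (String.ofList
        ('>' :: (PySem.List.slice row (some 1) (some (PySem.Str.len line - 1)) ++ ['.']))),
       st.2 + 1)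
  else st

-- inner-loop body of A's second (south) loop (`east_state` is fixed; state = (north_state, moved))
def pvSouthBodyA (east_state : List String) (y : Int) (st : List String × Int) (xc : Int × Char) : List String × Int :=
  if xc.2 == 'v' &&
     PySem.List.pyGetD (PySem.List.pyGetD east_state (PySem.Int.mod (y + 1) (PySem.List.len east_state)) "").toList xc.1 '?' == '.' then
    -- north_state[y] = north_state[y][:x] + "." + north_state[y][x+1:]
    let r1 := (PySem.List.pyGetD st.1 y "").toList
    let ns1 := PySem.List.pySetD st.1 y (String.ofList
      (PySem.List.slice r1 none (some xc.1) ++ ['.'] ++ PySem.List.slice r1 (some (xc.1 + 1)) none))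
    -- north_state[(y+1) % H] = north_state[(y+1) % H][:x] + "v" + north_state[(y+1) % H][x+1:]
    let y2 := PySem.Int.mod (y + 1) (PySem.List.len east_state)
    let r2 := (PySem.List.pyGetD ns1 y2 "").toList
    (PySem.List.pySetD ns1 y2 (String.ofList
      (PySem.List.slice r2 none (some xc.1) ++ ['v'] ++ PySem.List.slice r2 (some (xc.1 + 1)) none)),
     st.2 + 1)
  else st

def pvEastOuterA (st : List String × Int) (yl : Int × String) : List String × Int :=
  (PySem.List.enumerate yl.2.toList).foldl (pvEastBodyA yl.2 yl.1) st

def pvSouthOuterA (east_state : List String) (st : List String × Int) (yl : Int × String) : List String × Int :=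
  (PySem.List.enumerate yl.2.toList).foldl (pvSouthBodyA east_state yl.1) st

def move_cucumbers (current_state : List String) : List String × Int :=
  -- east_state = [x[:] for x in current_state]  (string copy)
  let east0 := current_state.map (fun x => x)
  let p1 := (PySem.List.enumerate current_state).foldl pvEastOuterA (east0, 0)
  -- north_state = [x[:] for x in east_state]
  let north0 := p1.1.map (fun x => x)
  let p2 := (PySem.List.enumerate p1.1).foldl (pvSouthOuterA p1.1) (north0, p1.2)
  (p2.1, p2.2)

-- ===== PORT B =====
-- Source B computes every output cell from its input neighbourhood; each new row is built
-- left to right by appending one char per cell (out.append), nothing is mutated.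
-- one cell of the east pass: `line` is the input row snapshot, xc = (x, c) from enumerate
def pvEastCellB (line : List Char) (st : List Char × Int) (xc : Int × Char) : List Char × Int :=
  if xc.2 == '.' && PySem.List.pyGetD line (xc.1 - 1) '?' == '>' then
    (st.1 ++ ['>'], st.2)
  else if xc.2 == '>' && PySem.List.pyGetD line (PySem.Int.mod (xc.1 + 1) (PySem.List.len line)) '?' == '.' then
    (st.1 ++ ['.'], st.2 + 1)
  else (st.1 ++ [xc.2], st.2)

-- one row of Source B's east loop: out = []; scan enumerate(line); east.append(''.join(out))
def pvEastLineB (st : List String × Int) (line : String) : List String × Int :=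
  let inner := (PySem.List.enumerate line.toList).foldl (pvEastCellB line.toList) ([], st.2)
  (st.1 ++ [String.ofList inner.1], inner.2)

-- one cell of the south pass: above/below are the cyclically adjacent rows of `east`
def pvSouthCellB (above below : List Char) (st : List Char × Int) (xc : Int × Char) : List Char × Int :=
  if xc.2 == '.' && decide (xc.1 < (above.length : Int)) && PySem.List.pyGetD above xc.1 '?' == 'v' then
    (st.1 ++ ['v'], st.2)
  else if xc.2 == 'v' && PySem.List.pyGetD below xc.1 '?' == '.' then
    (st.1 ++ ['.'], st.2 + 1)
  else (st.1 ++ [xc.2], st.2)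

-- one row of Source B's south loop: above = east[y-1]; below = east[(y+1)%H]; scan enumerate(line)
def pvSouthLineB (east : List String) (st : List String × Int) (yl : Int × String) : List String × Int :=
  let above := (PySem.List.pyGetD east (yl.1 - 1) "").toList
  let below := (PySem.List.pyGetD east (PySem.Int.mod (yl.1 + 1) (PySem.List.len east)) "").toList
  let inner := (PySem.List.enumerate yl.2.toList).foldl (pvSouthCellB above below) ([], st.2)
  (st.1 ++ [String.ofList inner.1], inner.2)

def move_cucumbers_alt (current_state : List String) : List String × Int :=
  let p1 := current_state.foldl pvEastLineB ([], 0)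
  let p2 := (PySem.List.enumerate p1.1).foldl (pvSouthLineB p1.1) ([], p1.2)
  (p2.1, p2.2)

-- ===== PRECONDITION & SPEC =====
-- Pre_ excludes exactly the inputs on which the Python A raises IndexError: a 'v' in some row at a
-- column x that does not exist in the (cyclically) next row — only possible on ragged grids.
def Pre_move_cucumbers (current_state : List String) : Prop :=
  ∀ y < current_state.length, ∀ x < (current_state.getD y "").toList.length,
    (current_state.getD y "").toList.getD x '?' = 'v' →
      x < (current_state.getD ((y + 1) % current_state.length) "").toList.length
instance (current_state : List String) : Decidable (Pre_move_cucumbers current_state) := by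
  unfold Pre_move_cucumbers; infer_instance

def pvWitness_move_cucumbers : List String := ["v..", ".>.", "..v"]

def Spec_move_cucumbers (current_state : List String) (out : List String × Int) : Prop := out = move_cucumbers_alt current_state
instance (current_state : List String) (out : List String × Int) : Decidable (Spec_move_cucumbers current_state out) := by unfold Spec_move_cucumbers; infer_instance

-- ===== CLAIM (what is proved, stated in full; the proofs are below) =====
def Claim_equal_move_cucumbers : Prop := ∀ (current_state : List String), Dom_move_cucumbers current_state → Pre_move_cucumbers current_state → Spec_move_cucumbers current_state (move_cucumbers current_state)

-- ===== LEMMAS AND PROOFS =====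

-- ---- Proof-internal scatter formulation (bridge between A and B): A is first reduced to this
-- char-list scatter, which is then proved equal to B's gather. These defs belong to the proof,
-- not to either port.
def pvEastRowB (row : List Char) (st : List Char × Int) (x : Nat) : List Char × Int :=
  let W := row.length
  if row.getD x '?' == '>' && row.getD ((x + 1) % W) '?' == '.' then
    ((st.1.set x '.').set ((x + 1) % W) '>', st.2 + 1)
  else st

def pvEastRowsB (acc : List (List Char) × Int) (row_s : String) : List (List Char) × Int :=
  let row := row_s.toList
  let inner := (List.range row.length).foldl (pvEastRowB row) (row, acc.2)
  (acc.1 ++ [inner.1], inner.2)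

def pvSouthRowB (east : List (List Char)) (H : Nat) (y : Nat) (st : List (List Char) × Int) (x : Nat) :
    List (List Char) × Int :=
  let row := east.getD y []
  let nxt := east.getD ((y + 1) % H) []
  if row.getD x '?' == 'v' && nxt.getD x '?' == '.' then
    let s1 := st.1.set y ((st.1.getD y []).set x '.')
    (s1.set ((y + 1) % H) ((s1.getD ((y + 1) % H) []).set x 'v'), st.2 + 1)
  else st

def pvSouthOuterB (east : List (List Char)) (H : Nat) (st : List (List Char) × Int) (y : Nat) :
    List (List Char) × Int :=
  (List.range (east.getD y []).length).foldl (pvSouthRowB east H y) st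

def pvScatter (current_state : List String) : List String × Int :=
  let step1 := current_state.foldl pvEastRowsB ([], 0)
  let east := step1.1
  let H := east.length
  let south0 := east.map (fun r => r)
  let step2 := (List.range H).foldl (pvSouthOuterB east H) (south0, step1.2)
  (step2.1.map String.ofList, step2.2)

theorem pv_getD_eq {α : Type} (l : List α) (i : Nat) (d : α) (h : i < l.length) : l.getD i d = l[i] := by
  simp [List.getD, List.getElem?_eq_getElem h]

theorem pv_getD_set {α : Type} (l : List α) (n i : Nat) (v d : α) (hn : n < l.length) :
    (l.set n v).getD i d = if i = n then v else l.getD i d := by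
  simp only [List.getD, List.getElem?_set]
  by_cases h : n = i
  · subst h; simp [hn]
  · rw [if_neg h, if_neg (fun hh => h hh.symm)]

theorem pv_getD_map_toList (xs : List String) (i : Nat) :
    (xs.map String.toList).getD i [] = (xs.getD i "").toList := by
  simpa using List.getD_map xs "" String.toList (n := i)

theorem pv_surgery_interior : ∀ (k : Nat) (r : List Char), k + 1 < r.length →
    List.take k r ++ '.' :: '>' :: List.drop (k+2) r = (r.set k '.').set (k+1) '>' := by
  intro k
  induction k with
  | zero =>
    intro r h
    match r, h with
    | a :: b :: t, _ => simp
  | succ k ih =>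
    intro r h
    match r with
    | a :: t =>
      simp only [List.length_cons] at h
      simp [List.set_cons_succ, ih t (by omega)]

theorem pv_surgery_wrap (r : List Char) (n : Nat) (hr : r.length = n) (h : 2 ≤ n) :
    '>' :: (List.take (n-2) (List.drop 1 r) ++ ['.']) = (r.set (n-1) '.').set 0 '>' := by
  rcases r with _ | ⟨a, t⟩
  · simp at hr; omega
  · simp only [List.length_cons] at hr
    have h1 : n - 1 = (n - 2) + 1 := by omega
    rw [h1]
    simp only [List.set_cons_succ, List.set_cons_zero, List.drop_one, List.tail_cons]
    congr 1
    rw [List.set_eq_take_cons_drop '.' (by omega)]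
    have h2 : n - 2 + 1 = t.length := by omega
    rw [h2, List.drop_length]

theorem pv_east_step (lineS : String) (base : List String) (y : Nat) (hy : y < base.length)
    (k : Nat) (a : Char) (hk : k < lineS.toList.length) (ha : lineS.toList.getD k '?' = a)
    (r : List Char) (m : Int) (hr : r.length = lineS.toList.length) :
    pvEastBodyA lineS (y : Int) (base.set y (String.ofList r), m) ((k : Int), a)
    = (base.set y (String.ofList (pvEastRowB lineS.toList (r, m) k).1),
       (pvEastRowB lineS.toList (r, m) k).2) := by
  have hcast : ((k : Int) + 1) = ((k + 1 : Nat) : Int) := by push_cast; ring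
  simp only [pvEastBodyA, pvEastRowB, PySem.Str.len_eq, hcast, PySem.Int.mod_natCast,
    PySem.List.pyGetD_natCast, ha, Nat.cast_lt]
  by_cases hc : (a == '>' && lineS.toList.getD ((k + 1) % lineS.toList.length) '?' == '.') = true
  · rw [if_pos hc, if_pos hc]
    by_cases h2 : k + 1 < lineS.toList.length
    · rw [if_pos h2]
      have hbase : (base.set y (String.ofList r)).getD y "" = String.ofList r := by
        rw [pv_getD_set _ _ _ _ _ hy]; simp
      have hc2 : ((k : Int) + 2) = ((k + 2 : Nat) : Int) := by push_cast; ring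
      simp only [hbase, String.toList_ofList, hc2, PySem.List.slice_to_natCast,
        PySem.List.slice_from_natCast, PySem.List.pySetD_natCast, List.set_set,
        Nat.mod_eq_of_lt h2]
      rw [← pv_surgery_interior k r (by omega)]
      simp
    · rw [if_neg h2]
      have hn2 : 2 ≤ lineS.toList.length := by
        by_contra hle
        have hk0 : k = 0 := by omega
        have hn1 : lineS.toList.length = 1 := by omega
        subst hk0
        rw [hn1, Nat.mod_self, ha] at hc
        simp only [Bool.and_eq_true, beq_iff_eq] at hc
        obtain ⟨hc1, hc3⟩ := hc
        rw [hc1] at hc3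
        cases hc3
      have hbase : (base.set y (String.ofList r)).getD y "" = String.ofList r := by
        rw [pv_getD_set _ _ _ _ _ hy]; simp
      have hk1 : k = lineS.toList.length - 1 := by omega
      have hsub : ((lineS.toList.length : Int) - 1) = ((lineS.toList.length - 1 : Nat) : Int) := by
        omega
      have h3 : lineS.toList.length - 1 - 1 = lineS.toList.length - 2 := by omega
      have h4 : (lineS.toList.length - 1 + 1) % lineS.toList.length = 0 := by
        rw [Nat.sub_add_cancel (by omega)]; exact Nat.mod_self _
      rw [hbase]
      simp only [String.toList_ofList, hsub]
      rw [PySem.List.slice_toNat r (a := 1) (b := ((lineS.toList.length - 1 : Nat) : Int)) (by omega) (by omega)]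
      simp only [Int.toNat_one, Int.toNat_natCast, h3, PySem.List.pySetD_natCast, List.set_set, hk1, h4]
      rw [← pv_surgery_wrap r lineS.toList.length hr hn2]
  · rw [if_neg hc, if_neg hc]

theorem pv_getD_map_ofList (xs : List (List Char)) (i : Nat) :
    (xs.map String.ofList).getD i "" = String.ofList (xs.getD i []) := by
  exact List.getD_map xs [] String.ofList (n := i)

theorem pv_east_inner (lineS : String) (base : List String) (y : Nat) (hy : y < base.length) :
    ∀ (t : List Char) (k : Nat), lineS.toList.drop k = t →
    ∀ (r : List Char) (m : Int), r.length = lineS.toList.length →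
    (PySem.List.enumerate t (k : Int)).foldl (pvEastBodyA lineS (y : Int)) (base.set y (String.ofList r), m)
    = (base.set y (String.ofList ((List.range' k t.length).foldl (pvEastRowB lineS.toList) (r, m)).1),
       ((List.range' k t.length).foldl (pvEastRowB lineS.toList) (r, m)).2) := by
  intro t
  induction t with
  | nil =>
    intro k _ r m _
    simp [PySem.List.enumerate_nil]
  | cons a t' ih =>
    intro k hdrop r m hr
    have hk : k < lineS.toList.length := by
      by_contra hge
      rw [List.drop_eq_nil_of_le (by omega)] at hdrop
      cases hdrop
    have hcons := List.drop_eq_getElem_cons hk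
    rw [hdrop] at hcons
    injection hcons with ha' hdrop'
    have ha : lineS.toList.getD k '?' = a := by rw [pv_getD_eq _ _ _ hk, ha']
    have hlenB : (pvEastRowB lineS.toList (r, m) k).1.length = r.length := by
      unfold pvEastRowB
      dsimp only
      split <;> simp
    have hc1 : ((k : Int) + 1) = ((k + 1 : Nat) : Int) := by push_cast; ring
    simp only [List.length_cons]
    rw [PySem.List.enumerate_cons, List.foldl_cons, List.range'_succ, List.foldl_cons,
        pv_east_step lineS base y hy k a hk ha r m hr, hc1,
        ih (k+1) hdrop'.symm (pvEastRowB lineS.toList (r, m) k).1 (pvEastRowB lineS.toList (r, m) k).2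
          (by rw [hlenB, hr])]

theorem pv_east_outer : ∀ (suf : List String) (t : Nat) (accB : List (List Char)) (m : Int),
    accB.length = t →
    (PySem.List.enumerate suf (t : Int)).foldl pvEastOuterA (accB.map String.ofList ++ suf, m)
    = ((suf.foldl pvEastRowsB (accB, m)).1.map String.ofList, (suf.foldl pvEastRowsB (accB, m)).2) := by
  intro suf
  induction suf with
  | nil =>
    intro t accB m _
    simp [PySem.List.enumerate_nil]
  | cons line suf' ih =>
    intro t accB m hlen
    have hy : t < (accB.map String.ofList ++ line :: suf').length := by
      simp; omega
    have hset : ∀ v, (accB.map String.ofList ++ line :: suf').set t v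
        = accB.map String.ofList ++ v :: suf' := by
      intro v
      have ht : t = (accB.map String.ofList).length := by simp [hlen]
      rw [ht]
      simp
    rw [PySem.List.enumerate_cons, List.foldl_cons]
    have hstate : (accB.map String.ofList ++ line :: suf', m)
        = ((accB.map String.ofList ++ line :: suf').set t (String.ofList line.toList), m) := by
      rw [hset, String.ofList_toList]
    rw [hstate]
    have hinner := pv_east_inner line (accB.map String.ofList ++ line :: suf') t hy
      line.toList 0 rfl line.toList m rfl
    rw [Nat.cast_zero] at hinner
    have hstep : pvEastOuterA
        ((accB.map String.ofList ++ line :: suf').set t (String.ofList line.toList), m) ((t : Int), line)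
        = ((accB.map String.ofList ++ line :: suf').set t
            (String.ofList ((List.range' 0 line.toList.length).foldl (pvEastRowB line.toList) (line.toList, m)).1),
           ((List.range' 0 line.toList.length).foldl (pvEastRowB line.toList) (line.toList, m)).2) := by
      unfold pvEastOuterA
      simpa using hinner
    rw [hstep, hset]
    have hc1 : ((t : Int) + 1) = ((t + 1 : Nat) : Int) := by push_cast; ring
    rw [hc1]
    rw [show accB.map String.ofList
          ++ String.ofList ((List.range' 0 line.toList.length).foldl (pvEastRowB line.toList) (line.toList, m)).1 :: suf'
        = (accB ++ [((List.range' 0 line.toList.length).foldl (pvEastRowB line.toList) (line.toList, m)).1]).map String.ofList ++ suf'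
      by simp]
    rw [ih (t+1) (accB ++ [((List.range' 0 line.toList.length).foldl (pvEastRowB line.toList) (line.toList, m)).1])
          ((List.range' 0 line.toList.length).foldl (pvEastRowB line.toList) (line.toList, m)).2
          (by simp [hlen])]
    have hrows : pvEastRowsB (accB, m) line
        = (accB ++ [((List.range' 0 line.toList.length).foldl (pvEastRowB line.toList) (line.toList, m)).1],
           ((List.range' 0 line.toList.length).foldl (pvEastRowB line.toList) (line.toList, m)).2) := by
      unfold pvEastRowsB
      dsimp only
      rw [List.range_eq_range']
    simp only [List.foldl_cons, hrows]

theorem pv_map_roundtrip (xs : List String) : (xs.map String.toList).map String.ofList = xs := by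
  simp [List.map_map, Function.comp_def, String.ofList_toList]

theorem pv_map_roundtrip2 (xs : List (List Char)) : (xs.map String.ofList).map String.toList = xs := by
  simp [List.map_map, Function.comp_def, String.toList_ofList]

theorem pv_getD_set_len (l : List (List Char)) (n i : Nat) (v : List Char)
    (hv : v.length = (l.getD n []).length) :
    ((l.set n v).getD i []).length = (l.getD i []).length := by
  by_cases h : n < l.length
  · rw [pv_getD_set _ _ _ _ _ h]
    by_cases hi : i = n
    · rw [if_pos hi, hi, hv]
    · rw [if_neg hi]
  · rw [List.set_eq_of_length_le (by omega)]

theorem pv_southRowB_pres (east' : List (List Char)) (He y x : Nat) (st : List (List Char) × Int) :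
    (pvSouthRowB east' He y st x).1.length = st.1.length ∧
    (∀ i, ((pvSouthRowB east' He y st x).1.getD i []).length = (st.1.getD i []).length) := by
  unfold pvSouthRowB
  dsimp only
  split
  · constructor
    · simp
    · intro i
      rw [pv_getD_set_len _ _ _ _ (by simp)]
      exact pv_getD_set_len _ _ _ _ (by simp)
  · exact ⟨rfl, fun _ => rfl⟩

theorem pv_southB_pres (east' : List (List Char)) (He y : Nat) :
    ∀ (l : List Nat) (st : List (List Char) × Int),
      (l.foldl (pvSouthRowB east' He y) st).1.length = st.1.length ∧
      (∀ i, ((l.foldl (pvSouthRowB east' He y) st).1.getD i []).length = (st.1.getD i []).length) := by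
  intro l
  induction l with
  | nil => intro st; exact ⟨rfl, fun _ => rfl⟩
  | cons x l ih =>
    intro st
    obtain ⟨h1, h2⟩ := ih (pvSouthRowB east' He y st x)
    obtain ⟨g1, g2⟩ := pv_southRowB_pres east' He y x st
    refine ⟨?_, ?_⟩
    · rw [List.foldl_cons, h1, g1]
    · intro i
      rw [List.foldl_cons, h2 i, g2 i]

theorem pv_south_step (eastA : List String) (y : Nat) (hy : y < eastA.length)
    (k : Nat) (a : Char) (hk : k < (eastA.getD y "").toList.length)
    (ha : (eastA.getD y "").toList.getD k '?' = a)
    (ns : List String) (m : Int) (hns : ns.length = eastA.length)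
    (hlen : ∀ i, (ns.getD i "").toList.length = (eastA.getD i "").toList.length) :
    pvSouthBodyA eastA (y : Int) (ns, m) ((k : Int), a)
    = ((pvSouthRowB (eastA.map String.toList) eastA.length y (ns.map String.toList, m) k).1.map String.ofList,
       (pvSouthRowB (eastA.map String.toList) eastA.length y (ns.map String.toList, m) k).2) := by
  have hH0 : 0 < eastA.length := by omega
  have hy2 : (y + 1) % eastA.length < eastA.length := Nat.mod_lt _ hH0
  have hcast : ((y : Int) + 1) = ((y + 1 : Nat) : Int) := by push_cast; ring
  have hcast2 : ((k : Int) + 1) = ((k + 1 : Nat) : Int) := by push_cast; ring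
  simp only [pvSouthBodyA, pvSouthRowB, PySem.List.len_eq, hcast, PySem.Int.mod_natCast,
    PySem.List.pyGetD_natCast, pv_getD_map_toList, ha]
  by_cases hc : (a == 'v' && (eastA.getD ((y + 1) % eastA.length) "").toList.getD k '?' == '.') = true
  · rw [if_pos hc, if_pos hc]
    have hk1 : k < (ns.getD y "").toList.length := by rw [hlen y]; exact hk
    have hk2 : k < (eastA.getD ((y + 1) % eastA.length) "").toList.length := by
      by_contra hge
      have : (eastA.getD ((y + 1) % eastA.length) "").toList.getD k '?' = '?' := by
        rw [List.getD_eq_getElem?_getD, List.getElem?_eq_none (by omega)]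
        rfl
      rw [Bool.and_eq_true] at hc
      rw [this] at hc
      cases hc.2
    rw [hcast2]
    simp only [PySem.List.slice_to_natCast, PySem.List.slice_from_natCast,
      PySem.List.pySetD_natCast]
    rw [show List.take k (ns.getD y "").toList ++ ['.'] ++ List.drop (k + 1) (ns.getD y "").toList
        = (ns.getD y "").toList.set k '.' by
      rw [List.set_eq_take_cons_drop '.' hk1]; simp]
    rw [show List.take k ((ns.set y (String.ofList ((ns.getD y "").toList.set k '.'))).getD ((y + 1) % eastA.length) "").toList ++ ['v'] ++ List.drop (k + 1) ((ns.set y (String.ofList ((ns.getD y "").toList.set k '.'))).getD ((y + 1) % eastA.length) "").toList = ((ns.set y (String.ofList ((ns.getD y "").toList.set k '.'))).getD ((y + 1) % eastA.length) "").toList.set k 'v' by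
      rw [List.set_eq_take_cons_drop 'v' (by
        rw [pv_getD_set _ _ _ _ _ (by omega)]
        by_cases hyy : ((y + 1) % eastA.length) = y
        · rw [if_pos hyy, String.toList_ofList]
          simp only [List.length_set]
          rw [hlen y, ← hyy]
          exact hk2
        · rw [if_neg hyy]
          rw [hlen ((y + 1) % eastA.length)]
          exact hk2)]
      simp]
    have e1 : (List.map String.toList ns).set y ((ns.getD y "").toList.set k '.')
        = (ns.set y (String.ofList ((ns.getD y "").toList.set k '.'))).map String.toList := by
      rw [List.map_set, String.toList_ofList]
    rw [e1, pv_getD_map_toList]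
    have e2 : ((ns.set y (String.ofList ((ns.getD y "").toList.set k '.'))).map String.toList).set ((y + 1) % eastA.length) (((ns.set y (String.ofList ((ns.getD y "").toList.set k '.'))).getD ((y + 1) % eastA.length) "").toList.set k 'v')
        = ((ns.set y (String.ofList ((ns.getD y "").toList.set k '.'))).set ((y + 1) % eastA.length) (String.ofList (((ns.set y (String.ofList ((ns.getD y "").toList.set k '.'))).getD ((y + 1) % eastA.length) "").toList.set k 'v'))).map String.toList := by
      rw [List.map_set, String.toList_ofList, List.map_set, String.toList_ofList, ← e1]
    rw [e2, pv_map_roundtrip]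
  · rw [if_neg hc, if_neg hc]
    rw [pv_map_roundtrip]

theorem pv_south_inner (eastA : List String) (y : Nat) (hy : y < eastA.length) :
    ∀ (t : List Char) (k : Nat), (eastA.getD y "").toList.drop k = t →
    ∀ (ns : List String) (m : Int),
    ns.length = eastA.length →
    (∀ i, (ns.getD i "").toList.length = (eastA.getD i "").toList.length) →
    (PySem.List.enumerate t (k : Int)).foldl (pvSouthBodyA eastA (y : Int)) (ns, m)
    = (((List.range' k t.length).foldl (pvSouthRowB (eastA.map String.toList) eastA.length y) (ns.map String.toList, m)).1.map String.ofList,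
       ((List.range' k t.length).foldl (pvSouthRowB (eastA.map String.toList) eastA.length y) (ns.map String.toList, m)).2) := by
  intro t
  induction t with
  | nil =>
    intro k _ ns m _ _
    simp only [PySem.List.enumerate_nil, List.length_nil, List.range'_zero, List.foldl_nil]
    rw [pv_map_roundtrip]
  | cons a t' ih =>
    intro k hdrop ns m hns hlen
    have hk : k < (eastA.getD y "").toList.length := by
      by_contra hge
      rw [List.drop_eq_nil_of_le (by omega)] at hdrop
      cases hdrop
    have hcons := List.drop_eq_getElem_cons hk
    rw [hdrop] at hcons
    injection hcons with ha' hdrop'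
    have ha : (eastA.getD y "").toList.getD k '?' = a := by rw [pv_getD_eq _ _ _ hk, ha']
    have hc1 : ((k : Int) + 1) = ((k + 1 : Nat) : Int) := by push_cast; ring
    obtain ⟨p1, p2⟩ := pv_southRowB_pres (eastA.map String.toList) eastA.length y k (ns.map String.toList, m)
    simp only [List.length_cons]
    rw [PySem.List.enumerate_cons, List.foldl_cons, List.range'_succ, List.foldl_cons,
        pv_south_step eastA y hy k a hk ha ns m hns hlen, hc1,
        ih (k+1) hdrop'.symm ((pvSouthRowB (eastA.map String.toList) eastA.length y (ns.map String.toList, m) k).1.map String.ofList) (pvSouthRowB (eastA.map String.toList) eastA.length y (ns.map String.toList, m) k).2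
          (by rw [List.length_map, p1, List.length_map, hns])
          (by
            intro i
            rw [pv_getD_map_ofList, String.toList_ofList, p2 i, pv_getD_map_toList]
            exact hlen i),
        pv_map_roundtrip2]

theorem pv_south_outer (eastA : List String) :
    ∀ (suf : List String) (t : Nat), eastA.drop t = suf →
    ∀ (ns : List String) (m : Int),
    ns.length = eastA.length →
    (∀ i, (ns.getD i "").toList.length = (eastA.getD i "").toList.length) →
    (PySem.List.enumerate suf (t : Int)).foldl (pvSouthOuterA eastA) (ns, m)
    = (((List.range' t suf.length).foldl (pvSouthOuterB (eastA.map String.toList) eastA.length) (ns.map String.toList, m)).1.map String.ofList,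
       ((List.range' t suf.length).foldl (pvSouthOuterB (eastA.map String.toList) eastA.length) (ns.map String.toList, m)).2) := by
  intro suf
  induction suf with
  | nil =>
    intro t _ ns m _ _
    simp only [PySem.List.enumerate_nil, List.length_nil, List.range'_zero, List.foldl_nil]
    rw [pv_map_roundtrip]
  | cons line suf' ih =>
    intro t hdrop ns m hns hlen
    have ht : t < eastA.length := by
      by_contra hge
      rw [List.drop_eq_nil_of_le (by omega)] at hdrop
      cases hdrop
    have hcons := List.drop_eq_getElem_cons ht
    rw [hdrop] at hcons
    injection hcons with hl hdrop'
    have hgetD : eastA.getD t "" = line := by rw [pv_getD_eq _ _ _ ht, hl]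
    simp only [List.length_cons]
    rw [PySem.List.enumerate_cons, List.foldl_cons, List.range'_succ, List.foldl_cons]
    have hinner := pv_south_inner eastA t ht line.toList 0
      (by rw [hgetD]; exact List.drop_zero) ns m hns hlen
    rw [Nat.cast_zero] at hinner
    have hstep : pvSouthOuterA eastA (ns, m) ((t : Int), line)
        = (((List.range' 0 line.toList.length).foldl (pvSouthRowB (eastA.map String.toList) eastA.length t) (ns.map String.toList, m)).1.map String.ofList, ((List.range' 0 line.toList.length).foldl (pvSouthRowB (eastA.map String.toList) eastA.length t) (ns.map String.toList, m)).2) := by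
      unfold pvSouthOuterA
      simpa using hinner
    have hstepB : pvSouthOuterB (eastA.map String.toList) eastA.length (ns.map String.toList, m) t
        = ((List.range' 0 line.toList.length).foldl (pvSouthRowB (eastA.map String.toList) eastA.length t) (ns.map String.toList, m)) := by
      unfold pvSouthOuterB
      rw [pv_getD_map_toList, hgetD, List.range_eq_range']
    have hc1 : ((t : Int) + 1) = ((t + 1 : Nat) : Int) := by push_cast; ring
    obtain ⟨p1, p2⟩ := pv_southB_pres (eastA.map String.toList) eastA.length t
      (List.range' 0 line.toList.length) (ns.map String.toList, m)
    rw [hstep, hstepB, hc1,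
        ih (t+1) hdrop'.symm (((List.range' 0 line.toList.length).foldl (pvSouthRowB (eastA.map String.toList) eastA.length t) (ns.map String.toList, m)).1.map String.ofList) ((List.range' 0 line.toList.length).foldl (pvSouthRowB (eastA.map String.toList) eastA.length t) (ns.map String.toList, m)).2
          (by rw [List.length_map, p1, List.length_map, hns])
          (by
            intro i
            rw [pv_getD_map_ofList, String.toList_ofList, p2 i, pv_getD_map_toList]
            exact hlen i),
        pv_map_roundtrip2]

theorem pv_A_eq_scatter (cs : List String) : move_cucumbers cs = pvScatter cs := by
  unfold move_cucumbers pvScatter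
  simp only [List.map_id']
  have heast := pv_east_outer cs 0 [] 0 rfl
  rw [Nat.cast_zero] at heast
  simp only [List.map_nil, List.nil_append] at heast
  rw [heast]
  have hsouth := pv_south_outer ((cs.foldl pvEastRowsB ([], 0)).1.map String.ofList)
    ((cs.foldl pvEastRowsB ([], 0)).1.map String.ofList) 0 List.drop_zero
    ((cs.foldl pvEastRowsB ([], 0)).1.map String.ofList) (cs.foldl pvEastRowsB ([], 0)).2
    rfl (fun _ => rfl)
  rw [Nat.cast_zero, pv_map_roundtrip2, List.length_map] at hsouth
  rw [hsouth, List.range_eq_range']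

-- ---- Phase 2: scatter = gather ----

def pvMovE (r : List Char) (x : Nat) : Bool :=
  (r.getD x '?' == '>') && (r.getD ((x + 1) % r.length) '?' == '.')

def pvValE (r : List Char) (k x : Nat) : Char :=
  if pvMovE r x = true ∧ x < k then '.'
  else if pvMovE r ((x + r.length - 1) % r.length) = true ∧ (x + r.length - 1) % r.length < k then '>'
  else r.getD x '?'

theorem pv_prev_val (W x : Nat) (hx : x < W) :
    (x + W - 1) % W = if x = 0 then W - 1 else x - 1 := by
  by_cases h : x = 0
  · subst h; simp [Nat.mod_eq_of_lt (by omega : W - 1 < W)]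
  · rw [if_neg h]
    have : x + W - 1 = (x - 1) + W := by omega
    rw [this, Nat.add_mod_right, Nat.mod_eq_of_lt (by omega)]

theorem pv_prev_eq_iff (W k x : Nat) (hk : k < W) (hx : x < W) :
    (x + W - 1) % W = k ↔ x = (k + 1) % W := by
  rw [pv_prev_val W x hx]
  by_cases hkk : k + 1 = W
  · rw [hkk, Nat.mod_self]
    split_ifs with h0 <;> omega
  · rw [Nat.mod_eq_of_lt (by omega)]
    split_ifs with h0 <;> omega

theorem pv_next_ne_self (r : List Char) (x : Nat) (hx : x < r.length)
    (h : pvMovE r x = true) : (x + 1) % r.length ≠ x := by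
  intro he
  unfold pvMovE at h
  simp only [Bool.and_eq_true, beq_iff_eq] at h
  rw [he, h.1] at h
  exact absurd h.2 (by decide)

theorem pv_scatE (r : List Char) : ∀ (j k : Nat), k + j = r.length →
    ∀ (l : List Char) (m : Int), l.length = r.length →
    (∀ x, x < r.length → l.getD x '?' = pvValE r k x) →
    ((List.range' k j).foldl (pvEastRowB r) (l, m)).1.length = r.length ∧
    (∀ x, x < r.length → ((List.range' k j).foldl (pvEastRowB r) (l, m)).1.getD x '?' = pvValE r r.length x) ∧
    ((List.range' k j).foldl (pvEastRowB r) (l, m)).2 = m + ((List.range' k j).filter (pvMovE r)).length := by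
  intro j
  induction j with
  | zero =>
    intro k hk l m hl hval
    simp only [List.range'_zero, List.foldl_nil]
    refine ⟨hl, ?_, by simp⟩
    intro x hx
    have hkr : k = r.length := by omega
    rw [hval x hx, hkr]
  | succ j ih =>
    intro k hk l m hl hval
    have hkW : k < r.length := by omega
    rw [List.range'_succ, List.foldl_cons, List.filter_cons]
    have hstep : pvEastRowB r (l, m) k =
        if pvMovE r k = true then ((l.set k '.').set ((k + 1) % r.length) '>', m + 1) else (l, m) := by
      unfold pvEastRowB pvMovE
      split_ifs with h <;> simp_all
    by_cases hm : pvMovE r k = true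
    · rw [hstep, if_pos hm, if_pos hm]
      have hne : (k + 1) % r.length ≠ k := pv_next_ne_self r k hkW hm
      have hl' : ((l.set k '.').set ((k + 1) % r.length) '>').length = r.length := by simp [hl]
      have hval' : ∀ x, x < r.length →
          ((l.set k '.').set ((k + 1) % r.length) '>').getD x '?' = pvValE r (k + 1) x := by
        intro x hx
        rw [pv_getD_set _ _ _ _ _ (by rw [List.length_set, hl]; exact Nat.mod_lt _ (by omega)),
            pv_getD_set _ _ _ _ _ (by rw [hl]; exact hkW)]
        by_cases hx1 : x = (k + 1) % r.length
        · rw [if_pos hx1]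
          unfold pvValE
          have hprevk : (x + r.length - 1) % r.length = k :=
            (pv_prev_eq_iff r.length k x hkW hx).mpr hx1
          have hm' := hm
          simp only [pvMovE, Bool.and_eq_true, beq_iff_eq] at hm'
          have hxdot : r.getD x '?' = '.' := by rw [hx1]; exact hm'.2
          have hmx : pvMovE r x = false := by
            unfold pvMovE
            rw [hxdot]
            simp
          rw [if_neg (by simp [hmx]), hprevk, if_pos ⟨hm, by omega⟩]
        · rw [if_neg hx1]
          by_cases hx2 : x = k
          · rw [if_pos hx2]
            unfold pvValE
            rw [if_pos ⟨by rw [hx2]; exact hm, by omega⟩]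
          · rw [if_neg hx2]
            rw [hval x hx]
            unfold pvValE
            have hne1 : ¬ (x + r.length - 1) % r.length = k := by
              rw [pv_prev_eq_iff r.length k x hkW hx]
              exact hx1
            have e1 : (pvMovE r x = true ∧ x < k + 1) ↔ (pvMovE r x = true ∧ x < k) := by
              constructor
              · rintro ⟨h1, h2⟩
                exact ⟨h1, by omega⟩
              · rintro ⟨h1, h2⟩
                exact ⟨h1, by omega⟩
            have e2 : (pvMovE r ((x + r.length - 1) % r.length) = true ∧ (x + r.length - 1) % r.length < k + 1)
                ↔ (pvMovE r ((x + r.length - 1) % r.length) = true ∧ (x + r.length - 1) % r.length < k) := by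
              constructor
              · rintro ⟨h1, h2⟩
                exact ⟨h1, by omega⟩
              · rintro ⟨h1, h2⟩
                exact ⟨h1, by omega⟩
            simp only [e1, e2]
      obtain ⟨c1, c2, c3⟩ := ih (k + 1) (by omega) _ (m + 1) hl' hval'
      refine ⟨c1, c2, ?_⟩
      rw [c3]
      simp only [List.length_cons]
      push_cast
      ring
    · rw [hstep, if_neg hm, if_neg (by simpa using hm)]
      have hval' : ∀ x, x < r.length → l.getD x '?' = pvValE r (k + 1) x := by
        intro x hx
        rw [hval x hx]
        unfold pvValE
        have e1 : (pvMovE r x = true ∧ x < k + 1) ↔ (pvMovE r x = true ∧ x < k) := by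
          constructor
          · rintro ⟨h1, h2⟩
            refine ⟨h1, ?_⟩
            rcases Nat.lt_succ_iff_lt_or_eq.mp h2 with h | h
            · exact h
            · rw [h] at h1
              exact absurd h1 (by simpa using hm)
          · rintro ⟨h1, h2⟩
            exact ⟨h1, by omega⟩
        have e2 : (pvMovE r ((x + r.length - 1) % r.length) = true ∧ (x + r.length - 1) % r.length < k + 1)
            ↔ (pvMovE r ((x + r.length - 1) % r.length) = true ∧ (x + r.length - 1) % r.length < k) := by
          constructor
          · rintro ⟨h1, h2⟩
            refine ⟨h1, ?_⟩
            rcases Nat.lt_succ_iff_lt_or_eq.mp h2 with h | h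
            · exact h
            · rw [h] at h1
              exact absurd h1 (by simpa using hm)
          · rintro ⟨h1, h2⟩
            exact ⟨h1, by omega⟩
        simp only [e1, e2]
      exact ih (k + 1) (by omega) l m hl hval'


theorem pv_prev_next (W x : Nat) (hx : x < W) : ((x + W - 1) % W + 1) % W = x := by
  rw [pv_prev_val W x hx]
  split_ifs with h0
  · subst h0
    rw [Nat.sub_add_cancel (by omega), Nat.mod_self]
  · rw [Nat.sub_add_cancel (by omega), Nat.mod_eq_of_lt hx]

theorem pv_valE_zero (r : List Char) (x : Nat) : pvValE r 0 x = r.getD x '?' := by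
  unfold pvValE
  rw [if_neg (by omega), if_neg (by omega)]

theorem pv_gath_cellE (r : List Char) (x : Nat) (hx : x < r.length) (acc : List Char) (m : Int) :
    pvEastCellB r (acc, m) ((x : Int), r.getD x '?')
    = (acc ++ [pvValE r r.length x], m + if pvMovE r x = true then 1 else 0) := by
  have hW : 0 < r.length := by omega
  have hprev : PySem.List.pyGetD r ((x : Int) - 1) '?' = r.getD ((x + r.length - 1) % r.length) '?' := by
    by_cases h0 : x = 0
    · subst h0
      have hne : r ≠ [] := by intro h; rw [h] at hW; simp at hW
      rw [show ((0 : Nat) : Int) - 1 = -1 by norm_num, PySem.List.pyGetD_neg_one r '?' hne,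
          List.getLast_eq_getElem, pv_prev_val r.length 0 hx, if_pos rfl,
          pv_getD_eq _ _ _ (by omega)]
    · rw [show ((x : Int) - 1) = ((x - 1 : Nat) : Int) by omega, PySem.List.pyGetD_natCast,
          pv_prev_val r.length x hx, if_neg h0]
  have hnext : PySem.List.pyGetD r (PySem.Int.mod ((x : Int) + 1) (PySem.List.len r)) '?'
      = r.getD ((x + 1) % r.length) '?' := by
    rw [PySem.List.len_eq, show ((x : Int) + 1) = ((x + 1 : Nat) : Int) by push_cast; ring,
        PySem.Int.mod_natCast, PySem.List.pyGetD_natCast]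
  have hprevlt : (x + r.length - 1) % r.length < r.length := Nat.mod_lt _ hW
  unfold pvEastCellB
  dsimp only
  rw [hprev, hnext]
  by_cases c1 : ((r.getD x '?' == '.') && (r.getD ((x + r.length - 1) % r.length) '?' == '>')) = true
  · rw [if_pos c1]
    simp only [Bool.and_eq_true, beq_iff_eq] at c1
    have hmprev : pvMovE r ((x + r.length - 1) % r.length) = true := by
      unfold pvMovE
      rw [pv_prev_next r.length x hx, c1.2, c1.1]
      decide
    have hmx : pvMovE r x = false := by
      unfold pvMovE
      rw [c1.1]
      simp
    have hval : pvValE r r.length x = '>' := by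
      unfold pvValE
      rw [if_neg (by simp [hmx]), if_pos ⟨hmprev, hprevlt⟩]
    rw [hval, hmx]
    simp
  · rw [if_neg c1]
    by_cases c2 : ((r.getD x '?' == '>') && (r.getD ((x + 1) % r.length) '?' == '.')) = true
    · rw [if_pos c2]
      have hmx : pvMovE r x = true := c2
      have hval : pvValE r r.length x = '.' := by
        unfold pvValE
        rw [if_pos ⟨hmx, hx⟩]
      rw [hval, hmx]
      simp
    · rw [if_neg c2]
      have hmx : pvMovE r x = false := by
        unfold pvMovE
        simpa using c2
      have hmprev : ¬ (pvMovE r ((x + r.length - 1) % r.length) = true ∧ (x + r.length - 1) % r.length < r.length) := by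
        rintro ⟨h1, _⟩
        unfold pvMovE at h1
        rw [pv_prev_next r.length x hx] at h1
        simp only [Bool.and_eq_true, beq_iff_eq] at h1
        apply c1
        rw [h1.2, h1.1]
        decide
      have hval : pvValE r r.length x = r.getD x '?' := by
        unfold pvValE
        rw [if_neg (by simp [hmx]), if_neg hmprev]
      rw [hval, hmx]
      simp

theorem pv_gathE (r : List Char) : ∀ (t : List Char) (k : Nat), r.drop k = t →
    ∀ (acc : List Char) (m : Int),
    (PySem.List.enumerate t (k : Int)).foldl (pvEastCellB r) (acc, m)
    = (acc ++ (List.range' k t.length).map (pvValE r r.length),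
       m + ((List.range' k t.length).filter (pvMovE r)).length) := by
  intro t
  induction t with
  | nil =>
    intro k _ acc m
    simp [PySem.List.enumerate_nil]
  | cons a t' ih =>
    intro k hdrop acc m
    have hk : k < r.length := by
      by_contra hge
      rw [List.drop_eq_nil_of_le (by omega)] at hdrop
      cases hdrop
    have hcons := List.drop_eq_getElem_cons hk
    rw [hdrop] at hcons
    injection hcons with ha' hdrop'
    have ha : r.getD k '?' = a := by rw [pv_getD_eq _ _ _ hk, ha']
    have hc1 : ((k : Int) + 1) = ((k + 1 : Nat) : Int) := by push_cast; ring
    simp only [List.length_cons]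
    rw [PySem.List.enumerate_cons, List.foldl_cons, ← ha,
        pv_gath_cellE r k hk acc m, hc1, ih (k + 1) hdrop'.symm, List.range'_succ,
        List.map_cons, List.filter_cons]
    by_cases hm : pvMovE r k = true
    · rw [hm]
      simp only [if_pos True.intro, List.length_cons, List.append_assoc, List.singleton_append,
        Prod.mk.injEq]
      exact ⟨trivial, by push_cast; ring⟩
    · rw [Bool.not_eq_true] at hm
      rw [hm]
      simp only [List.append_assoc, List.singleton_append, Prod.mk.injEq]
      exact ⟨trivial, by simp⟩

theorem pv_east_row_eq (line : String) (accA : List (List Char)) (m : Int) :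
    pvEastLineB (accA.map String.ofList, m) line
    = ((pvEastRowsB (accA, m) line).1.map String.ofList, (pvEastRowsB (accA, m) line).2) := by
  unfold pvEastLineB pvEastRowsB
  dsimp only
  have hg := pv_gathE line.toList line.toList 0 List.drop_zero [] m
  rw [Nat.cast_zero] at hg
  obtain ⟨s1, s2, s3⟩ := pv_scatE line.toList line.toList.length 0 (by omega) line.toList m rfl
    (fun x hx => (pv_valE_zero line.toList x).symm)
  rw [List.range_eq_range']
  have hrow : ((List.range' 0 line.toList.length).foldl (pvEastRowB line.toList) (line.toList, m)).1
      = (List.range' 0 line.toList.length).map (pvValE line.toList line.toList.length) := by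
    apply List.ext_getElem
    · simpa using s1
    · intro i h1 h2
      have hi : i < line.toList.length := by rw [s1] at h1; exact h1
      have := s2 i hi
      rw [pv_getD_eq _ _ _ h1] at this
      rw [this]
      simp [List.getElem_range']
  rw [hg, hrow, s3]
  simp

theorem pv_east_pass : ∀ (cs : List String) (accA : List (List Char)) (m : Int),
    cs.foldl pvEastLineB (accA.map String.ofList, m)
    = ((cs.foldl pvEastRowsB (accA, m)).1.map String.ofList, (cs.foldl pvEastRowsB (accA, m)).2) := by
  intro cs
  induction cs with
  | nil => intro accA m; simp
  | cons line cs' ih =>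
    intro accA m
    rw [List.foldl_cons, List.foldl_cons, pv_east_row_eq line accA m]
    have hstep : (pvEastRowsB (accA, m) line).1.map String.ofList
        = ((pvEastRowsB (accA, m) line).1).map String.ofList := rfl
    have hr : pvEastRowsB (accA, m) line
        = ((pvEastRowsB (accA, m) line).1, (pvEastRowsB (accA, m) line).2) := rfl
    rw [hr] at *
    exact ih (pvEastRowsB (accA, m) line).1 (pvEastRowsB (accA, m) line).2


-- ---- south pass: scatter = gather ----

def pvMovS (g : List (List Char)) (y x : Nat) : Bool :=
  ((g.getD y []).getD x '?' == 'v') && ((g.getD ((y + 1) % g.length) []).getD x '?' == '.')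

def pvValS (g : List (List Char)) (t k y x : Nat) : Char :=
  if pvMovS g y x = true ∧ (y < t ∨ (y = t ∧ x < k)) then '.'
  else if pvMovS g ((y + g.length - 1) % g.length) x = true
      ∧ ((y + g.length - 1) % g.length < t ∨ ((y + g.length - 1) % g.length = t ∧ x < k)) then 'v'
  else (g.getD y []).getD x '?'

def pvInvS (g : List (List Char)) (t k : Nat) (s : List (List Char)) : Prop :=
  s.length = g.length ∧ (∀ i, (s.getD i []).length = (g.getD i []).length) ∧
  (∀ y x, y < g.length → x < (g.getD y []).length → (s.getD y []).getD x '?' = pvValS g t k y x)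

theorem pv_movS_lt (g : List (List Char)) (y x : Nat) (h : pvMovS g y x = true) :
    x < (g.getD y []).length := by
  unfold pvMovS at h
  simp only [Bool.and_eq_true, beq_iff_eq] at h
  by_contra hge
  have : (g.getD y []).getD x '?' = '?' := by
    rw [List.getD_eq_getElem?_getD, List.getElem?_eq_none (by omega)]
    rfl
  rw [this] at h
  exact absurd h.1 (by decide)

theorem pv_movS_lt_next (g : List (List Char)) (y x : Nat) (h : pvMovS g y x = true) :
    x < (g.getD ((y + 1) % g.length) []).length := by
  unfold pvMovS at h
  simp only [Bool.and_eq_true, beq_iff_eq] at h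
  by_contra hge
  have : (g.getD ((y + 1) % g.length) []).getD x '?' = '?' := by
    rw [List.getD_eq_getElem?_getD, List.getElem?_eq_none (by omega)]
    rfl
  rw [this] at h
  exact absurd h.2 (by decide)

theorem pv_next_ne_selfS (g : List (List Char)) (y x : Nat) (h : pvMovS g y x = true) :
    (y + 1) % g.length ≠ y := by
  intro he
  unfold pvMovS at h
  rw [he] at h
  simp only [Bool.and_eq_true, beq_iff_eq] at h
  rw [h.1] at h
  exact absurd h.2 (by decide)

theorem pv_valS_congr (g : List (List Char)) (t k t' k' y x : Nat)
    (h1 : pvMovS g y x = true →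
      ((y < t ∨ (y = t ∧ x < k)) ↔ (y < t' ∨ (y = t' ∧ x < k'))))
    (h2 : pvMovS g ((y + g.length - 1) % g.length) x = true →
      (((y + g.length - 1) % g.length < t ∨ ((y + g.length - 1) % g.length = t ∧ x < k))
        ↔ ((y + g.length - 1) % g.length < t' ∨ ((y + g.length - 1) % g.length = t' ∧ x < k')))) :
    pvValS g t k y x = pvValS g t' k' y x := by
  unfold pvValS
  have e1 : (pvMovS g y x = true ∧ (y < t ∨ (y = t ∧ x < k)))
      ↔ (pvMovS g y x = true ∧ (y < t' ∨ (y = t' ∧ x < k'))) := by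
    constructor
    · rintro ⟨a, b⟩
      exact ⟨a, (h1 a).mp b⟩
    · rintro ⟨a, b⟩
      exact ⟨a, (h1 a).mpr b⟩
  have e2 : (pvMovS g ((y + g.length - 1) % g.length) x = true
        ∧ ((y + g.length - 1) % g.length < t ∨ ((y + g.length - 1) % g.length = t ∧ x < k)))
      ↔ (pvMovS g ((y + g.length - 1) % g.length) x = true
        ∧ ((y + g.length - 1) % g.length < t' ∨ ((y + g.length - 1) % g.length = t' ∧ x < k'))) := by
    constructor
    · rintro ⟨a, b⟩
      exact ⟨a, (h2 a).mp b⟩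
    · rintro ⟨a, b⟩
      exact ⟨a, (h2 a).mpr b⟩
  exact if_congr e1 rfl (if_congr e2 rfl rfl)

theorem pv_valS_zero (g : List (List Char)) (y x : Nat) :
    pvValS g 0 0 y x = (g.getD y []).getD x '?' := by
  unfold pvValS
  rw [if_neg (by rintro ⟨_, h⟩; omega), if_neg (by rintro ⟨_, h⟩; omega)]

theorem pv_invS_boundary (g : List (List Char)) (t : Nat) (ht : t < g.length)
    (s : List (List Char)) (h : pvInvS g t ((g.getD t []).length) s) : pvInvS g (t + 1) 0 s := by
  obtain ⟨a, b, c⟩ := h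
  refine ⟨a, b, ?_⟩
  intro y x hy hx
  rw [c y x hy hx]
  apply pv_valS_congr
  · intro hm
    constructor
    · rintro (h' | ⟨he, _⟩)
      · left; omega
      · left; omega
    · rintro (h' | ⟨_, h2⟩)
      · rcases Nat.lt_succ_iff_lt_or_eq.mp h' with h'' | h''
        · left; exact h''
        · right
          refine ⟨h'', ?_⟩
          have := pv_movS_lt g y x hm
          rw [h''] at this
          omega
      · omega
  · intro hm
    constructor
    · rintro (h' | ⟨he, _⟩)
      · left; omega
      · left; omega
    · rintro (h' | ⟨_, h2⟩)
      · rcases Nat.lt_succ_iff_lt_or_eq.mp h' with h'' | h''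
        · left; exact h''
        · right
          refine ⟨h'', ?_⟩
          have := pv_movS_lt g ((y + g.length - 1) % g.length) x hm
          rw [h''] at this
          omega
      · omega

theorem pv_scatS_row (g : List (List Char)) (t : Nat) (ht : t < g.length) :
    ∀ (j k : Nat), k + j = (g.getD t []).length →
    ∀ (s : List (List Char)) (m : Int), pvInvS g t k s →
    pvInvS g t ((g.getD t []).length) ((List.range' k j).foldl (pvSouthRowB g g.length t) (s, m)).1 ∧
    ((List.range' k j).foldl (pvSouthRowB g g.length t) (s, m)).2
      = m + ((List.range' k j).filter (pvMovS g t)).length := by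
  intro j
  induction j with
  | zero =>
    intro k hk s m hinv
    simp only [List.range'_zero, List.foldl_nil, List.filter_nil, List.length_nil]
    have hke : k = (g.getD t []).length := by omega
    exact ⟨hke ▸ hinv, by simp⟩
  | succ j ih =>
    intro k hk s m hinv
    obtain ⟨i1, i2, i3⟩ := hinv
    have hH : 0 < g.length := by omega
    rw [List.range'_succ, List.foldl_cons, List.filter_cons]
    have hstep : pvSouthRowB g g.length t (s, m) k
        = if pvMovS g t k = true then
            ((s.set t ((s.getD t []).set k '.')).set ((t + 1) % g.length)
              (((s.set t ((s.getD t []).set k '.')).getD ((t + 1) % g.length) []).set k 'v'), m + 1)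
          else (s, m) := by
      unfold pvSouthRowB pvMovS
      rfl
    by_cases hm : pvMovS g t k = true
    · rw [hstep, if_pos hm]
      have hy2lt : (t + 1) % g.length < g.length := Nat.mod_lt _ hH
      have hy2ne : (t + 1) % g.length ≠ t := pv_next_ne_selfS g t k hm
      have hkt : k < (g.getD t []).length := pv_movS_lt g t k hm
      have hky2 : k < (g.getD ((t + 1) % g.length) []).length := pv_movS_lt_next g t k hm
      have hprev_y2 : ((t + 1) % g.length + g.length - 1) % g.length = t :=
        (pv_prev_eq_iff g.length t ((t + 1) % g.length) ht hy2lt).mpr rfl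
      have hm' := hm
      unfold pvMovS at hm'
      simp only [Bool.and_eq_true, beq_iff_eq] at hm'
      have hs1y2 : (s.set t ((s.getD t []).set k '.')).getD ((t + 1) % g.length) []
          = s.getD ((t + 1) % g.length) [] := by
        rw [pv_getD_set _ _ _ _ _ (by rw [i1]; exact ht), if_neg hy2ne]
      have hinv' : pvInvS g t (k + 1)
          ((s.set t ((s.getD t []).set k '.')).set ((t + 1) % g.length)
            (((s.set t ((s.getD t []).set k '.')).getD ((t + 1) % g.length) []).set k 'v')) := by
        refine ⟨by simp [i1], ?_, ?_⟩
        · intro i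
          rw [pv_getD_set_len _ _ _ _ (by simp), pv_getD_set_len _ _ _ _ (by simp)]
          exact i2 i
        · intro y x hy hx
          rw [pv_getD_set _ _ _ _ _ (by simp only [List.length_set]; rw [i1]; exact hy2lt)]
          by_cases hyy2 : y = (t + 1) % g.length
          · subst hyy2
            rw [if_pos rfl, hs1y2, pv_getD_set _ _ _ _ _ (by rw [i2]; exact hky2)]
            by_cases hxk : x = k
            · subst hxk
              rw [if_pos rfl]
              unfold pvValS
              rw [if_neg, hprev_y2, if_pos ⟨hm, Or.inr ⟨rfl, by omega⟩⟩]
              rintro ⟨hc, _⟩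
              unfold pvMovS at hc
              simp only [Bool.and_eq_true, beq_iff_eq] at hc
              rw [hm'.2] at hc
              exact absurd hc.1 (by decide)
            · rw [if_neg hxk, i3 _ x hy2lt hx]
              apply pv_valS_congr
              · intro _
                omega
              · intro _
                rw [hprev_y2]
                omega
          · rw [if_neg hyy2, pv_getD_set _ _ _ _ _ (by rw [i1]; exact ht)]
            by_cases hyt : y = t
            · rw [hyt] at hx hyy2 ⊢
              rw [if_pos rfl, pv_getD_set _ _ _ _ _ (by rw [i2]; exact hkt)]
              by_cases hxk : x = k
              · subst hxk
                rw [if_pos rfl]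
                unfold pvValS
                rw [if_pos ⟨hm, Or.inr ⟨rfl, by omega⟩⟩]
              · rw [if_neg hxk, i3 _ x ht hx]
                apply pv_valS_congr
                · intro _
                  omega
                · intro _
                  have hPne : ¬ ((t + g.length - 1) % g.length = t) := by
                    intro hP
                    exact hyy2 ((pv_prev_eq_iff g.length t t ht ht).mp hP)
                  omega
            · rw [if_neg hyt, i3 _ x hy hx]
              apply pv_valS_congr
              · intro _
                omega
              · intro _
                have hPne : ¬ ((y + g.length - 1) % g.length = t) := by
                  intro hP
                  exact hyy2 ((pv_prev_eq_iff g.length t y ht hy).mp hP)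
                omega
      obtain ⟨c1, c2⟩ := ih (k + 1) (by omega) _ (m + 1) hinv'
      refine ⟨c1, ?_⟩
      rw [c2, if_pos hm]
      simp only [List.length_cons]
      push_cast
      ring
    · rw [hstep, if_neg hm]
      have hinv' : pvInvS g t (k + 1) s := by
        refine ⟨i1, i2, ?_⟩
        intro y x hy hx
        rw [i3 y x hy hx]
        apply pv_valS_congr
        · intro hm2
          constructor
          · intro h'
            omega
          · rintro (h' | ⟨he, hxk1⟩)
            · left; exact h'
            · by_cases hxk : x = k
              · rw [he, hxk] at hm2
                exact absurd hm2 hm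
              · right; exact ⟨he, by omega⟩
        · intro hm2
          constructor
          · intro h'
            omega
          · rintro (h' | ⟨he, hxk1⟩)
            · left; exact h'
            · by_cases hxk : x = k
              · rw [he, hxk] at hm2
                exact absurd hm2 hm
              · right; exact ⟨he, by omega⟩
      obtain ⟨c1, c2⟩ := ih (k + 1) (by omega) s m hinv'
      refine ⟨c1, ?_⟩
      rw [c2]
      rw [Bool.not_eq_true] at hm
      rw [hm]
      simp

theorem pv_scatS (g : List (List Char)) : ∀ (j t : Nat), t + j = g.length →
    ∀ (s : List (List Char)) (m : Int), pvInvS g t 0 s →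
    pvInvS g g.length 0 ((List.range' t j).foldl (pvSouthOuterB g g.length) (s, m)).1 ∧
    ((List.range' t j).foldl (pvSouthOuterB g g.length) (s, m)).2
      = m + ((List.range' t j).map
          (fun y => (((List.range (g.getD y []).length).filter (pvMovS g y)).length : Int))).sum := by
  intro j
  induction j with
  | zero =>
    intro t ht s m hinv
    simp only [List.range'_zero, List.foldl_nil, List.map_nil, List.sum_nil]
    have hte : t = g.length := by omega
    exact ⟨hte ▸ hinv, by simp⟩
  | succ j ih =>
    intro t htj s m hinv
    have ht : t < g.length := by omega
    rw [List.range'_succ, List.foldl_cons]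
    have hstep : pvSouthOuterB g g.length (s, m) t
        = (List.range' 0 (g.getD t []).length).foldl (pvSouthRowB g g.length t) (s, m) := by
      unfold pvSouthOuterB
      rw [List.range_eq_range']
    rw [hstep]
    obtain ⟨r1, r2⟩ := pv_scatS_row g t ht (g.getD t []).length 0 (by omega) s m hinv
    have hb := pv_invS_boundary g t ht _ r1
    obtain ⟨c1, c2⟩ := ih (t + 1) (by omega) _
      ((List.range' 0 (g.getD t []).length).foldl (pvSouthRowB g g.length t) (s, m)).2 hb
    rw [show ((List.range' 0 (g.getD t []).length).foldl (pvSouthRowB g g.length t) (s, m))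
        = (((List.range' 0 (g.getD t []).length).foldl (pvSouthRowB g g.length t) (s, m)).1,
           ((List.range' 0 (g.getD t []).length).foldl (pvSouthRowB g g.length t) (s, m)).2) from rfl]
    refine ⟨c1, ?_⟩
    rw [c2, r2, List.map_cons, List.sum_cons, List.range_eq_range']
    push_cast
    ring

theorem pv_gath_cellS (g : List (List Char)) (y x : Nat) (hy : y < g.length)
    (hx : x < (g.getD y []).length) (acc : List Char) (m : Int) :
    pvSouthCellB (g.getD ((y + g.length - 1) % g.length) []) (g.getD ((y + 1) % g.length) [])
      (acc, m) ((x : Int), (g.getD y []).getD x '?')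
    = (acc ++ [pvValS g g.length 0 y x], m + if pvMovS g y x = true then 1 else 0) := by
  have hH : 0 < g.length := by omega
  have hPlt : (y + g.length - 1) % g.length < g.length := Nat.mod_lt _ hH
  have hPnext : ((y + g.length - 1) % g.length + 1) % g.length = y := pv_prev_next g.length y hy
  unfold pvSouthCellB
  dsimp only
  rw [PySem.List.pyGetD_natCast, PySem.List.pyGetD_natCast]
  by_cases c1 : (((g.getD y []).getD x '?' == '.')
      && decide ((x : Int) < ((g.getD ((y + g.length - 1) % g.length) []).length : Int))
      && ((g.getD ((y + g.length - 1) % g.length) []).getD x '?' == 'v')) = true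
  · rw [if_pos c1]
    simp only [Bool.and_eq_true, beq_iff_eq, decide_eq_true_eq] at c1
    have hmP : pvMovS g ((y + g.length - 1) % g.length) x = true := by
      unfold pvMovS
      rw [hPnext, c1.2, c1.1.1]
      decide
    have hmy : pvMovS g y x = false := by
      unfold pvMovS
      rw [c1.1.1]
      simp
    have hval : pvValS g g.length 0 y x = 'v' := by
      unfold pvValS
      rw [if_neg (by simp [hmy]), if_pos ⟨hmP, Or.inl hPlt⟩]
    rw [hval, hmy]
    simp
  · rw [if_neg c1]
    by_cases c2 : (((g.getD y []).getD x '?' == 'v')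
        && ((g.getD ((y + 1) % g.length) []).getD x '?' == '.')) = true
    · rw [if_pos c2]
      have hmy : pvMovS g y x = true := c2
      have hval : pvValS g g.length 0 y x = '.' := by
        unfold pvValS
        rw [if_pos ⟨hmy, Or.inl hy⟩]
      rw [hval, hmy]
      simp
    · rw [if_neg c2]
      have hmy : pvMovS g y x = false := by
        unfold pvMovS
        simpa using c2
      have hmP : ¬ (pvMovS g ((y + g.length - 1) % g.length) x = true
          ∧ ((y + g.length - 1) % g.length < g.length
            ∨ ((y + g.length - 1) % g.length = g.length ∧ x < 0))) := by
        rintro ⟨h1, _⟩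
        have hxP := pv_movS_lt g ((y + g.length - 1) % g.length) x h1
        unfold pvMovS at h1
        rw [hPnext] at h1
        simp only [Bool.and_eq_true, beq_iff_eq] at h1
        apply c1
        rw [h1.1, h1.2]
        simp only [beq_self_eq_true, Bool.true_and, Bool.and_true, decide_eq_true_eq]
        exact_mod_cast hxP
      have hval : pvValS g g.length 0 y x = (g.getD y []).getD x '?' := by
        unfold pvValS
        rw [if_neg (by simp [hmy]), if_neg hmP]
      rw [hval, hmy]
      simp

theorem pv_gathS_row (g : List (List Char)) (y : Nat) (hy : y < g.length) :
    ∀ (t : List Char) (k : Nat), (g.getD y []).drop k = t →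
    ∀ (acc : List Char) (m : Int),
    (PySem.List.enumerate t (k : Int)).foldl
      (pvSouthCellB (g.getD ((y + g.length - 1) % g.length) []) (g.getD ((y + 1) % g.length) []))
      (acc, m)
    = (acc ++ (List.range' k t.length).map (pvValS g g.length 0 y),
       m + ((List.range' k t.length).filter (pvMovS g y)).length) := by
  intro t
  induction t with
  | nil =>
    intro k _ acc m
    simp [PySem.List.enumerate_nil]
  | cons a t' ih =>
    intro k hdrop acc m
    have hk : k < (g.getD y []).length := by
      by_contra hge
      rw [List.drop_eq_nil_of_le (by omega)] at hdrop
      cases hdrop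
    have hcons := List.drop_eq_getElem_cons hk
    rw [hdrop] at hcons
    injection hcons with ha' hdrop'
    have ha : (g.getD y []).getD k '?' = a := by rw [pv_getD_eq _ _ _ hk, ha']
    have hc1 : ((k : Int) + 1) = ((k + 1 : Nat) : Int) := by push_cast; ring
    simp only [List.length_cons]
    rw [PySem.List.enumerate_cons, List.foldl_cons, ← ha,
        pv_gath_cellS g y k hy hk acc m, hc1, ih (k + 1) hdrop'.symm, List.range'_succ,
        List.map_cons, List.filter_cons]
    by_cases hm : pvMovS g y k = true
    · rw [hm]
      simp only [if_pos True.intro, List.length_cons, List.append_assoc, List.singleton_append,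
        Prod.mk.injEq]
      exact ⟨trivial, by push_cast; ring⟩
    · rw [Bool.not_eq_true] at hm
      rw [hm]
      simp only [List.append_assoc, List.singleton_append, Prod.mk.injEq]
      exact ⟨trivial, by simp⟩

theorem pv_gathS_outer (g : List (List Char)) :
    ∀ (suf : List (List Char)) (t : Nat), g.drop t = suf →
    ∀ (acc : List String) (m : Int),
    (PySem.List.enumerate (suf.map String.ofList) (t : Int)).foldl
      (pvSouthLineB (g.map String.ofList)) (acc, m)
    = (acc ++ (List.range' t suf.length).map
        (fun y => String.ofList ((List.range' 0 (g.getD y []).length).map (pvValS g g.length 0 y))),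
       m + ((List.range' t suf.length).map
        (fun y => (((List.range (g.getD y []).length).filter (pvMovS g y)).length : Int))).sum) := by
  intro suf
  induction suf with
  | nil =>
    intro t _ acc m
    simp [PySem.List.enumerate_nil]
  | cons row suf' ih =>
    intro t hdrop acc m
    have ht : t < g.length := by
      by_contra hge
      rw [List.drop_eq_nil_of_le (by omega)] at hdrop
      cases hdrop
    have hH : 0 < g.length := by omega
    have hcons := List.drop_eq_getElem_cons ht
    rw [hdrop] at hcons
    injection hcons with hr' hdrop'
    have hrow : g.getD t [] = row := by rw [pv_getD_eq _ _ _ ht, hr']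
    have habove : (PySem.List.pyGetD (g.map String.ofList) ((t : Int) - 1) "").toList
        = g.getD ((t + g.length - 1) % g.length) [] := by
      by_cases h0 : t = 0
      · subst h0
        have hne : g.map String.ofList ≠ [] := by
          intro h
          rw [List.map_eq_nil_iff] at h
          rw [h] at hH
          simp at hH
        rw [show ((0 : Nat) : Int) - 1 = -1 by norm_num,
            PySem.List.pyGetD_neg_one _ "" hne, List.getLast_eq_getElem]
        simp only [List.length_map, List.getElem_map, String.toList_ofList]
        rw [pv_prev_val g.length 0 ht, if_pos rfl, pv_getD_eq _ _ _ (by omega)]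
      · rw [show ((t : Int) - 1) = ((t - 1 : Nat) : Int) by omega, PySem.List.pyGetD_natCast,
            pv_getD_map_ofList, String.toList_ofList, pv_prev_val g.length t ht, if_neg h0]
    have hbelow : (PySem.List.pyGetD (g.map String.ofList)
          (PySem.Int.mod ((t : Int) + 1) (PySem.List.len (g.map String.ofList))) "").toList
        = g.getD ((t + 1) % g.length) [] := by
      rw [PySem.List.len_eq, List.length_map,
          show ((t : Int) + 1) = ((t + 1 : Nat) : Int) by push_cast; ring,
          PySem.Int.mod_natCast, PySem.List.pyGetD_natCast, pv_getD_map_ofList,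
          String.toList_ofList]
    simp only [List.map_cons, List.length_cons]
    rw [PySem.List.enumerate_cons, List.foldl_cons]
    have hstep : pvSouthLineB (g.map String.ofList) (acc, m) ((t : Int), String.ofList row)
        = (acc ++ [String.ofList ((List.range' 0 (g.getD t []).length).map (pvValS g g.length 0 t))],
           m + ((List.range' 0 (g.getD t []).length).filter (pvMovS g t)).length) := by
      unfold pvSouthLineB
      dsimp only
      rw [habove, hbelow, String.toList_ofList, ← hrow]
      have hin := pv_gathS_row g t ht (g.getD t []) 0 List.drop_zero [] m
      rw [Nat.cast_zero] at hin
      rw [hin]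
      simp
    have hc1 : ((t : Int) + 1) = ((t + 1 : Nat) : Int) := by push_cast; ring
    rw [hstep, hc1, ih (t + 1) hdrop'.symm]
    rw [List.range'_succ, List.map_cons, List.map_cons, List.sum_cons]
    simp only [List.append_assoc, List.singleton_append, Prod.mk.injEq]
    refine ⟨trivial, ?_⟩
    rw [List.range_eq_range']
    push_cast
    ring

theorem pv_scatter_eq_alt (cs : List String) : pvScatter cs = move_cucumbers_alt cs := by
  unfold pvScatter move_cucumbers_alt
  have hE := pv_east_pass cs [] 0
  simp only [List.map_nil] at hE
  simp only [List.map_id']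
  set g := (cs.foldl pvEastRowsB ([], 0)).1 with hg
  set m1 := (cs.foldl pvEastRowsB ([], 0)).2 with hm1
  have hinit : pvInvS g 0 0 g := ⟨rfl, fun _ => rfl, fun y x hy hx => (pv_valS_zero g y x).symm⟩
  obtain ⟨sInv, sCnt⟩ := pv_scatS g g.length 0 (by omega) g m1 hinit
  have hG := pv_gathS_outer g g 0 List.drop_zero [] m1
  rw [Nat.cast_zero] at hG
  obtain ⟨l1, l2, l3⟩ := sInv
  have hrows : ((List.range' 0 g.length).foldl (pvSouthOuterB g g.length) (g, m1)).1
      = (List.range' 0 g.length).map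
          (fun y => (List.range' 0 (g.getD y []).length).map (pvValS g g.length 0 y)) := by
    apply List.ext_getElem
    · simp [l1]
    · intro i h1 h2
      have hi : i < g.length := by rw [l1] at h1; exact h1
      have hrow_eq : ((List.range' 0 g.length).foldl (pvSouthOuterB g g.length) (g, m1)).1.getD i []
          = (List.range' 0 (g.getD i []).length).map (pvValS g g.length 0 i) := by
        apply List.ext_getElem
        · rw [l2 i]
          simp
        · intro x hx1 hx2
          have hxg : x < (g.getD i []).length := by
            rw [l2 i] at hx1
            exact hx1
          have hv := l3 i x hi hxg
          rw [pv_getD_eq _ _ _ hx1] at hv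
          rw [hv]
          simp [List.getElem_range']
      rw [← pv_getD_eq _ _ _ h1, hrow_eq]
      simp [List.getElem_range']
  rw [List.range_eq_range', hE, hG, hrows, sCnt]
  simp [List.map_map, Function.comp_def]

theorem move_cucumbers_spec : Claim_equal_move_cucumbers := by
  unfold Claim_equal_move_cucumbers
  intro cs _ _
  unfold Spec_move_cucumbers
  rw [pv_A_eq_scatter, pv_scatter_eq_alt]
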